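-- pv_equiv track=rewrite | github.com/DIG-Network/proof_research | sub-problems/verifier-oracle-model/experiments/adaptive-coordinate-or-rsparse-xor-tree-depth-wt-four-five-n8/script.py | build_r_xor_partition_masks
-- ===== SOURCE A (Python) =====
-- from itertools import combinations
--
-- N = 8
--
-- def build_r_xor_partition_masks(masks: list[int], r: int) -> list[tuple[int, int]]:
--     dom = len(masks)
--     full = (1 << dom) - 1
--     out: list[tuple[int, int]] = []
--     for idxs in combinations(range(N), r):
--         b0 = 0
--         for ki, mm in enumerate(masks):
--             p = 0
--             for i in idxs:
--                 p ^= (mm >> i) & 1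
--             if p == 0:
--                 b0 |= 1 << ki
--         b1 = full ^ b0
--         out.append((b0, b1))
--     return out
-- ===== SOURCE B (Python) =====
-- from itertools import combinations
--
-- N = 8
--
-- def build_r_xor_partition_masks(masks: list[int], r: int) -> list[tuple[int, int]]:
--     # precompute a 256-entry parity table once (per-mask work per combination becomes one AND + lookup)
--     P = []
--     for v in range(256):
--         t, x = 0, v
--         while x:
--             t ^= x & 1
--             x >>= 1
--         P.append(t)
--     low = [m % 256 for m in masks]  # only bits 0..7 ever matter
--     full = (1 << len(masks)) - 1
--     out: list[tuple[int, int]] = []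
--     for idxs in combinations(range(N), r):
--         sel = 0
--         for i in idxs:
--             sel |= 1 << i
--         b0 = 0
--         for ki, v in enumerate(low):
--             if P[v & sel] == 0:
--                 b0 |= 1 << ki
--         out.append((b0, full ^ b0))
--     return out
-- ===== Notes on version B (the rewrite author's own statement) =====
-- stated objective: alternative
-- what changed: B precomputes a 256-entry bit-parity table and reduces each mask to its low byte once, then classifies each mask per combination with a single AND + table lookup against a selector bitmask, eliminating A's innermost per-index XOR loop.
import Mathlib
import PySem

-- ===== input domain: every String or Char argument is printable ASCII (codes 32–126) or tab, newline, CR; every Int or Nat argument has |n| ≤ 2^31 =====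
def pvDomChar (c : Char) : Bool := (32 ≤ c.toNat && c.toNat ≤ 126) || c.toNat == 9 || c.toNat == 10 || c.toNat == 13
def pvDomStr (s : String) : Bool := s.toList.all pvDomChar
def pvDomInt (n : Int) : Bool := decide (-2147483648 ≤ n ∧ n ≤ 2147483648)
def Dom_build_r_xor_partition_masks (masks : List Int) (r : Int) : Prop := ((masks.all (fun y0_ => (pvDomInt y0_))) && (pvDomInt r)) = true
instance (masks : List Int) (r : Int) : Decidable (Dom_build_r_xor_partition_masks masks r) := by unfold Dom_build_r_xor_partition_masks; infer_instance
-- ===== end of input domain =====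

-- B replaces A's innermost per-index XOR loop by a precomputed 256-entry parity table,
-- looked up through one AND with a per-combination selector bitmask (objective: alternative).

-- ===== PORT A =====

-- itertools.combinations(pool, k): lexicographic combinations (shared: both Pythons call it)
def pyCombinations : List Int → Nat → List (List Int)
  | _, 0 => [[]]
  | [], _ + 1 => []
  | x :: xs, k + 1 => ((pyCombinations xs k).map (fun t => x :: t)) ++ pyCombinations xs (k + 1)

-- mm >> i  (i comes from range(8) so i ≥ 0; i.toNat is exact)
def pyShr (a : Int) (k : Nat) : Int := a >>> k

-- inner loop: p ^= (mm >> i) & 1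
def innerA (mm : Int) (idxs : List Int) : Int :=
  idxs.foldl (fun p i => PySem.Int.bxor p (PySem.Int.band (pyShr mm i.toNat) 1)) 0

-- for ki, mm in enumerate(masks): if p == 0: b0 |= 1 << ki
def b0LoopA (idxs : List Int) : List Int → Nat → Int → Int
  | [], _, b0 => b0
  | mm :: rest, ki, b0 =>
      b0LoopA idxs rest (ki + 1) (if innerA mm idxs = 0 then PySem.Int.bor b0 (1 <<< ki) else b0)

def build_r_xor_partition_masks (masks : List Int) (r : Int) : List (Int × Int) :=
  let dom := masks.length
  let full : Int := (1 <<< dom) - 1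
  (pyCombinations (PySem.List.pyRange 0 8 1) r.toNat).map (fun idxs =>
    let b0 := b0LoopA idxs masks 0 0
    (b0, PySem.Int.bxor full b0))

-- ===== PORT B =====

-- while x: t ^= x & 1; x >>= 1   (values stay in ℕ: x starts in range(256))
def bparity (x : Nat) : Nat :=
  if x = 0 then 0 else (x % 2) ^^^ bparity (x / 2)
decreasing_by exact Nat.div_lt_self (Nat.pos_of_ne_zero (by assumption)) (by norm_num)

-- sel = 0; for i in idxs: sel |= 1 << i  (i from range(8), so nonnegative; kept in ℕ)
def selB (idxs : List Int) : Nat :=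
  idxs.foldl (fun s i => s ||| (1 <<< i.toNat)) 0

-- for ki, v in enumerate(low): if P[v & sel] == 0: b0 |= 1 << ki  (index v & sel < 256, in range)
def b0LoopB (P : List Nat) (sel : Nat) : List Nat → Nat → Int → Int
  | [], _, b0 => b0
  | v :: rest, ki, b0 =>
      b0LoopB P sel rest (ki + 1) (if P.getD (v &&& sel) 0 = 0 then PySem.Int.bor b0 (1 <<< ki) else b0)

def build_r_xor_partition_masks_alt (masks : List Int) (r : Int) : List (Int × Int) :=
  let P : List Nat := (List.range 256).map bparity
  let low : List Nat := masks.map (fun m => (PySem.Int.mod m 256).toNat)  -- m % 256 ∈ [0,256)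
  let full : Int := (1 <<< masks.length) - 1
  (pyCombinations (PySem.List.pyRange 0 8 1) r.toNat).map (fun idxs =>
    let sel := selB idxs
    let b0 := b0LoopB P sel low 0 0
    (b0, PySem.Int.bxor full b0))

-- ===== PRECONDITION & SPEC =====
-- Pre_ excludes r < 0, on which itertools.combinations raises ValueError in A (and in B).
def Pre_build_r_xor_partition_masks (masks : List Int) (r : Int) : Prop := 0 ≤ r
instance (masks : List Int) (r : Int) : Decidable (Pre_build_r_xor_partition_masks masks r) := by
  unfold Pre_build_r_xor_partition_masks; infer_instance

def pvWitness_build_r_xor_partition_masks : List Int × Int := ([5, 12, -3], 2)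

def Spec_build_r_xor_partition_masks (masks : List Int) (r : Int) (out : List (Int × Int)) : Prop :=
  out = build_r_xor_partition_masks_alt masks r
instance (masks : List Int) (r : Int) (out : List (Int × Int)) :
    Decidable (Spec_build_r_xor_partition_masks masks r out) := by
  unfold Spec_build_r_xor_partition_masks; infer_instance

-- ===== CLAIM (what is proved, stated in full; the proofs are below) =====
def Claim_equal_build_r_xor_partition_masks : Prop :=
  ∀ (masks : List Int) (r : Int), Dom_build_r_xor_partition_masks masks r →
    Pre_build_r_xor_partition_masks masks r →
    Spec_build_r_xor_partition_masks masks r (build_r_xor_partition_masks masks r)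

-- ===== LEMMAS AND PROOFS =====

theorem combs_sublist {pool : List Int} : ∀ {k : Nat} {l : List Int},
    l ∈ pyCombinations pool k → l.Sublist pool := by
  induction pool with
  | nil =>
    intro k l h
    cases k with
    | zero => simp [pyCombinations] at h; simp [h]
    | succ k => simp [pyCombinations] at h
  | cons x xs ih =>
    intro k l h
    cases k with
    | zero => simp [pyCombinations] at h; simp [h]
    | succ k =>
      simp only [pyCombinations, List.mem_append, List.mem_map] at h
      rcases h with ⟨t, ht, rfl⟩ | h
      · exact (ih ht).cons₂ x
      · exact (ih h).cons x

theorem bit_low (mm : Int) (i : Nat) (hi : i < 8) :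
    PySem.Int.band (pyShr mm i) 1 = ((((PySem.Int.mod mm 256).toNat >>> i) &&& 1 : Nat) : Int) := by
  unfold pyShr
  rw [PySem.Int.band_one, PySem.Int.mod_eq_emod_of_pos (by norm_num : (0:Int) < 2),
      PySem.Int.mod_eq_emod_of_pos (by norm_num : (0:Int) < 256), Int.shiftRight_eq_div_pow,
      Nat.shiftRight_eq_div_pow, Nat.and_one_is_mod]
  interval_cases i <;> (push_cast; omega)

theorem or_eq_zero_left {a b : Nat} (h : a ||| b = 0) : a = 0 := by
  apply Nat.eq_of_testBit_eq
  intro j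
  have hj : (a ||| b).testBit j = false := by rw [h]; exact Nat.zero_testBit j
  rw [Nat.testBit_or] at hj
  simp_all [Nat.zero_testBit]

theorem or_div_two (a b : Nat) : (a ||| b) / 2 = a / 2 ||| b / 2 := by
  apply Nat.eq_of_testBit_eq
  intro j
  simp [Nat.testBit_div_two, Nat.testBit_or]

theorem bparity_zero : bparity 0 = 0 := by rw [bparity]; simp

theorem bparity_pos (x : Nat) (h : x ≠ 0) : bparity x = (x % 2) ^^^ bparity (x / 2) := by
  rw [bparity]; simp [h]

theorem and_div_two (a b : Nat) : (a &&& b) / 2 = a / 2 &&& b / 2 := by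
  apply Nat.eq_of_testBit_eq
  intro j
  simp [Nat.testBit_div_two, Nat.testBit_and]

theorem or_mod_two_of_disjoint (a b : Nat) (h : a &&& b = 0) :
    (a ||| b) % 2 = a % 2 ^^^ b % 2 := by
  have h0 : (a.testBit 0 && b.testBit 0) = false := by
    rw [← Nat.testBit_and, h, Nat.zero_testBit]
  have ho : (a ||| b).testBit 0 = (a.testBit 0 || b.testBit 0) := Nat.testBit_or a b 0
  simp only [Nat.testBit_zero] at h0 ho
  rw [← Bool.decide_or, decide_eq_decide] at ho
  rw [← Bool.decide_and, decide_eq_false_iff_not] at h0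
  rcases Nat.mod_two_eq_zero_or_one a with ha | ha <;>
    rcases Nat.mod_two_eq_zero_or_one b with hb | hb <;>
      rw [ha, hb] <;> norm_num <;> omega

theorem bparity_or (a b : Nat) (h : a &&& b = 0) :
    bparity (a ||| b) = bparity a ^^^ bparity b := by
  induction a using Nat.strong_induction_on generalizing b with
  | _ a ih =>
  rcases Nat.eq_zero_or_pos a with rfl | hapos
  · simp [bparity_zero]
  rcases Nat.eq_zero_or_pos b with rfl | hbpos
  · simp [bparity_zero]
  have hne : a ||| b ≠ 0 := fun h0 => by have := or_eq_zero_left h0; omega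
  have hdiv : (a ||| b) / 2 = a / 2 ||| b / 2 := or_div_two a b
  have hdisj2 : a / 2 &&& b / 2 = 0 := by
    have h2 : (a &&& b) / 2 = a / 2 &&& b / 2 := and_div_two a b
    omega
  rw [bparity_pos _ hne, bparity_pos a (by omega), bparity_pos b (by omega), hdiv,
      ih (a / 2) (Nat.div_lt_self hapos (by norm_num)) (b / 2) hdisj2,
      or_mod_two_of_disjoint a b h]
  simp [Nat.xor_comm, Nat.xor_left_comm]

theorem bparity_two_pow (i : Nat) : bparity (2 ^ i) = 1 := by
  induction i with
  | zero => rw [pow_zero, bparity_pos 1 one_ne_zero]; simp [bparity_zero]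
  | succ i ih =>
    rw [bparity_pos _ (by positivity), pow_succ, Nat.mul_div_cancel _ (by norm_num : (0:Nat) < 2)]
    simp [Nat.mul_mod_left, ih]

theorem bparity_and_two_pow (v i : Nat) : bparity (v &&& 2 ^ i) = (v >>> i) &&& 1 := by
  rw [Nat.and_two_pow, Nat.shiftRight_eq_div_pow, Nat.and_one_is_mod]
  cases hb : v.testBit i
  · rw [Nat.testBit_eq_decide_div_mod_eq] at hb
    simp only [decide_eq_false_iff_not] at hb
    simp [bparity_zero]
    omega
  · rw [Nat.testBit_eq_decide_div_mod_eq] at hb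
    simp only [decide_eq_true_eq] at hb
    simp [bparity_two_pow]
    omega

theorem and_or_distrib_left' (v a b : Nat) : v &&& (a ||| b) = (v &&& a) ||| (v &&& b) := by
  apply Nat.eq_of_testBit_eq
  intro j
  simp [Nat.testBit_and, Nat.testBit_or, Bool.and_or_distrib_left]

theorem two_pow_and_eq_zero (n s : Nat) (h : s.testBit n = false) : 2 ^ n &&& s = 0 := by
  apply Nat.eq_of_testBit_eq
  intro j
  simp only [Nat.testBit_and, Nat.testBit_two_pow, Nat.zero_testBit]
  rcases eq_or_ne n j with rfl | hne
  · simp [h]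
  · simp [hne]

theorem and_and_disjoint (v a b : Nat) (h : a &&& b = 0) : (v &&& a) &&& (v &&& b) = 0 := by
  apply Nat.eq_of_testBit_eq
  intro j
  have h0 : (a.testBit j && b.testBit j) = false := by
    rw [← Nat.testBit_and, h, Nat.zero_testBit]
  simp only [Nat.testBit_and, Nat.zero_testBit]
  cases ha : a.testBit j <;> cases hbj : b.testBit j <;> simp_all

theorem foldl_xor_acc (f : Int → Nat) (l : List Int) (a : Nat) :
    l.foldl (fun p i => p ^^^ f i) a = a ^^^ l.foldl (fun p i => p ^^^ f i) 0 := by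
  induction l generalizing a with
  | nil => simp
  | cons i t ih =>
    simp only [List.foldl_cons]
    rw [ih (a ^^^ f i), ih (0 ^^^ f i)]
    simp [Nat.xor_assoc]

theorem foldl_or_acc (f : Int → Nat) (l : List Int) (a : Nat) :
    l.foldl (fun s i => s ||| f i) a = a ||| l.foldl (fun s i => s ||| f i) 0 := by
  induction l generalizing a with
  | nil => simp
  | cons i t ih =>
    simp only [List.foldl_cons]
    rw [ih (a ||| f i), ih (0 ||| f i)]
    simp [Nat.or_assoc]

theorem selB_cons (i : Int) (t : List Int) : selB (i :: t) = (1 <<< i.toNat) ||| selB t := by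
  unfold selB
  simp only [List.foldl_cons]
  rw [foldl_or_acc]
  simp

theorem testBit_selB (j : Nat) : ∀ (t : List Int), (∀ x ∈ t, x.toNat ≠ j) →
    (selB t).testBit j = false := by
  intro t
  induction t with
  | nil => intro _; simp [selB, Nat.zero_testBit]
  | cons i t ih =>
    intro h
    rw [selB_cons, Nat.testBit_or, Nat.one_shiftLeft, Nat.testBit_two_pow,
        ih (fun x hx => h x (List.mem_cons_of_mem _ hx))]
    simp [h i List.mem_cons_self]

theorem natfold_eq (v : Nat) : ∀ (idxs : List Int), (∀ i ∈ idxs, 0 ≤ i ∧ i < 8) →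
    idxs.Pairwise (· < ·) →
    idxs.foldl (fun p i => p ^^^ ((v >>> i.toNat) &&& 1)) 0 = bparity (v &&& selB idxs) := by
  intro idxs
  induction idxs with
  | nil => intro _ _; simp [selB, bparity_zero]
  | cons i t ih =>
    intro hb hp
    have hi := hb i List.mem_cons_self
    have hbt : ∀ x ∈ t, 0 ≤ x ∧ x < 8 := fun x hx => hb x (List.mem_cons_of_mem _ hx)
    rcases List.pairwise_cons.mp hp with ⟨hlt, hpt⟩
    have hnotin : (selB t).testBit i.toNat = false := by
      apply testBit_selB
      intro x hx
      have := hlt x hx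
      have := (hbt x hx).1
      omega
    have hdisj : 2 ^ i.toNat &&& selB t = 0 := two_pow_and_eq_zero _ _ hnotin
    simp only [List.foldl_cons]
    rw [foldl_xor_acc, ih hbt hpt, selB_cons, Nat.one_shiftLeft, and_or_distrib_left',
        bparity_or _ _ (and_and_disjoint v _ _ hdisj), bparity_and_two_pow]
    simp

theorem foldl_cast (mm : Int) : ∀ (idxs : List Int), (∀ i ∈ idxs, 0 ≤ i ∧ i < 8) → ∀ (a : Nat),
    idxs.foldl (fun p i => PySem.Int.bxor p (PySem.Int.band (pyShr mm i.toNat) 1)) (a : Int)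
      = ((idxs.foldl (fun p i => p ^^^ (((PySem.Int.mod mm 256).toNat >>> i.toNat) &&& 1)) a : Nat) : Int) := by
  intro idxs
  induction idxs with
  | nil => intro _ a; simp
  | cons i t ih =>
    intro hb a
    have hi := hb i List.mem_cons_self
    simp only [List.foldl_cons]
    rw [bit_low mm i.toNat (by omega), PySem.Int.bxor_natCast]
    exact ih (fun x hx => hb x (List.mem_cons_of_mem _ hx)) _

theorem getD_range_map (f : Nat → Nat) (k : Nat) (h : k < 256) :
    ((List.range 256).map f).getD k 0 = f k := by
  rw [List.getD_eq_getElem?_getD]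
  simp [h]

theorem cond_eq (mm : Int) (idxs : List Int) (hb : ∀ i ∈ idxs, 0 ≤ i ∧ i < 8)
    (hp : idxs.Pairwise (· < ·)) :
    (innerA mm idxs = 0)
      ↔ (((List.range 256).map bparity).getD ((PySem.Int.mod mm 256).toNat &&& selB idxs) 0 = 0) := by
  have hv : (PySem.Int.mod mm 256).toNat < 256 := by
    have h1 := PySem.Int.mod_lt mm (by norm_num : (0:Int) < 256)
    omega
  have hk : (PySem.Int.mod mm 256).toNat &&& selB idxs < 256 :=
    lt_of_le_of_lt Nat.and_le_left hv
  rw [getD_range_map _ _ hk]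
  have hA : innerA mm idxs = ((bparity ((PySem.Int.mod mm 256).toNat &&& selB idxs) : Nat) : Int) := by
    unfold innerA
    have h0 := foldl_cast mm idxs hb 0
    simp only [Nat.cast_zero] at h0
    rw [h0, natfold_eq _ idxs hb hp]
  rw [hA]
  exact_mod_cast Iff.rfl

theorem b0Loop_eq (idxs : List Int) (hb : ∀ i ∈ idxs, 0 ≤ i ∧ i < 8)
    (hp : idxs.Pairwise (· < ·)) : ∀ (ms : List Int) (ki : Nat) (b0 : Int),
    b0LoopA idxs ms ki b0
      = b0LoopB ((List.range 256).map bparity) (selB idxs)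
          (ms.map (fun m => (PySem.Int.mod m 256).toNat)) ki b0 := by
  intro ms
  induction ms with
  | nil => intro ki b0; rfl
  | cons mm rest ih =>
    intro ki b0
    simp only [List.map_cons, b0LoopA, b0LoopB]
    rw [if_congr (cond_eq mm idxs hb hp) rfl rfl]
    exact ih _ _

-- ===== VERDICT (by name: the statement is the Claim_ definition above) =====
theorem build_r_xor_partition_masks_spec : Claim_equal_build_r_xor_partition_masks := by
  intro masks r _ _
  unfold Spec_build_r_xor_partition_masks
  unfold build_r_xor_partition_masks build_r_xor_partition_masks_alt
  apply List.map_congr_left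
  intro idxs hmem
  have hsub := combs_sublist hmem
  have hb : ∀ i ∈ idxs, 0 ≤ i ∧ i < 8 := by
    intro i hi
    have := PySem.List.mem_pyRange_one.mp (hsub.subset hi)
    omega
  have hp : idxs.Pairwise (· < ·) :=
    (PySem.List.pairwise_lt_pyRange_one 0 8).sublist hsub
  rw [b0Loop_eq idxs hb hp]
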